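-- pv_equiv track=rewrite | github.com/Yu-Oscar/bno_calculator | bno_calculator.py | check_12_months_period
-- ===== SOURCE A (Python) =====
-- def check_12_months_period(monthly_days):
--     # Flatten the monthly_days structure into a list of tuples (year, month, days_out)
--     flattened_days = []
--     for year, months in sorted(monthly_days.items()):
--         for month, days in sorted(months.items()):
--             flattened_days.append((year, month, days))
--
--     # Check every 12-month window
--     limit = 180
--     for i in range(len(flattened_days)):
--         total_days = 0
--         for j in range(i, len(flattened_days)):
--             year, month, days = flattened_days[j]
--             total_days += days
--
--             # Calculate the difference in months between the first entry in the window and the current entry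
--             start_year, start_month, _ = flattened_days[i]
--             delta_months = (year - start_year) * 12 + (month - start_month)
--
--             # If it's a 12-month period, check the limit
--             if delta_months == 11:
--                 if total_days > limit:
--                     return False
--                 break
--     return True
-- ===== SOURCE B (Python) =====
-- def check_12_months_period(monthly_days):
--     # One right-to-left pass: linearize each (year, month) to t = 12*year + month,
--     # keep a running suffix sum of days and a dict mapping t -> days strictly after
--     # the nearest entry with that t; an exact 12-month window starting at the current
--     # entry ends at the nearest entry with t + 11, so its total is O(1) to read off.
--     flat = [(y, m, d) for y, months in sorted(monthly_days.items())
--             for m, d in sorted(months.items())]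
--     after = {}
--     suffix = 0
--     ok = True
--     for y, m, d in reversed(flat):
--         t = 12 * y + m
--         suffix += d
--         tgt = after.get(t + 11)
--         if tgt is not None and suffix - tgt > 180:
--             ok = False
--         after[t] = suffix - d
--     return ok
-- ===== Notes on version B (the rewrite author's own statement) =====
-- stated objective: faster
-- what changed: Replaces the quadratic scan over every window start with a single right-to-left pass that keeps a running suffix sum and a dict from linearized month index t=12*y+m to the suffix sum after its nearest occurrence, so each 12-month window total is a constant-time lookup.
import Mathlib
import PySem

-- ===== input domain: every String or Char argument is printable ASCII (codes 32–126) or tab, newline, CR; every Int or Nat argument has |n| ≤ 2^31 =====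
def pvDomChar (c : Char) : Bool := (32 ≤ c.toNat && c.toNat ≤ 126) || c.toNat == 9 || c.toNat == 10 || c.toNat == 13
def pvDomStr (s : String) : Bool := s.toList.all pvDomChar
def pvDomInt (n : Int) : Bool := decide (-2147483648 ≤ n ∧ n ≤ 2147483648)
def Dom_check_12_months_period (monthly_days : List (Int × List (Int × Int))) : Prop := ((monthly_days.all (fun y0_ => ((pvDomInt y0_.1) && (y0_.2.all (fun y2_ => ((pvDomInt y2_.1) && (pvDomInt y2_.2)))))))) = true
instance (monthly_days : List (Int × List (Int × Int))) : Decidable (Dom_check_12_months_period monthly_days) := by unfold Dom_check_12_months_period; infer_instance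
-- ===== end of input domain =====

-- B replaces A's quadratic per-start rescans with one right-to-left pass (suffix sum +
-- dict from linearized month index to the suffix sum after its nearest occurrence): faster.

-- ===== PORT A =====
-- sorted(…items()) is ported as a stable sort by the key component: a Python dict's keys are
-- distinct, so the tuple comparison never reaches the second components.
def pvFlattenA (monthly_days : List (Int × List (Int × Int))) : List (Int × Int × Int) :=
  (PySem.List.sorted monthly_days (fun p => p.1)).foldl
    (fun acc p =>
      (PySem.List.sorted p.2 (fun q => q.1)).foldl
        (fun acc2 q => acc2 ++ [(p.1, q.1, q.2)]) acc) []

-- inner 'for j in range(i, len)' loop: returns true iff 'return False' is hit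
def pvInnerA (sy sm : Int) : List (Int × Int × Int) → Int → Bool
  | [], _ => false
  | e :: rest, total =>
    let total := total + e.2.2
    let delta := (e.1 - sy) * 12 + (e.2.1 - sm)
    if delta = 11 then decide (total > 180) else pvInnerA sy sm rest total

-- outer 'for i in range(len)' loop: each i scans the suffix flattened[i:]
def pvOuterA : List (Int × Int × Int) → Bool
  | [] => true
  | e :: rest => if pvInnerA e.1 e.2.1 (e :: rest) 0 then false else pvOuterA rest

def check_12_months_period (monthly_days : List (Int × List (Int × Int))) : Bool :=
  pvOuterA (pvFlattenA monthly_days)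

-- ===== PORT B =====
def pvFlatB (monthly_days : List (Int × List (Int × Int))) : List (Int × Int × Int) :=
  (PySem.List.sorted monthly_days (fun p => p.1)).flatMap
    (fun p => (PySem.List.sorted p.2 (fun q => q.1)).map (fun q => (p.1, q.1, q.2)))

-- one step of the 'for y, m, d in reversed(flat)' loop; state = (after, suffix, ok)
def pvStepB (st : PySem.Dict Int Int × Int × Bool) (e : Int × Int × Int) :
    PySem.Dict Int Int × Int × Bool :=
  let t := 12 * e.1 + e.2.1
  let suffix := st.2.1 + e.2.2
  let ok := match st.1.get? (t + 11) with
    | some tgt => if suffix - tgt > 180 then false else st.2.2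
    | none => st.2.2
  (st.1.insert t (suffix - e.2.2), suffix, ok)

def check_12_months_period_alt (monthly_days : List (Int × List (Int × Int))) : Bool :=
  (((pvFlatB monthly_days).reverse.foldl pvStepB (PySem.Dict.empty, 0, true))).2.2

-- ===== PRECONDITION & SPEC =====
def Spec_check_12_months_period (monthly_days : List (Int × List (Int × Int))) (out : Bool) : Prop := out = check_12_months_period_alt monthly_days
instance (monthly_days : List (Int × List (Int × Int))) (out : Bool) : Decidable (Spec_check_12_months_period monthly_days out) := by unfold Spec_check_12_months_period; infer_instance

-- ===== CLAIM (what is proved, stated in full; the proofs are below) =====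
def Claim_equal_check_12_months_period : Prop := ∀ (monthly_days : List (Int × List (Int × Int))), Dom_check_12_months_period monthly_days → Spec_check_12_months_period monthly_days (check_12_months_period monthly_days)

-- ===== LEMMAS AND PROOFS =====

-- B's run as a right fold (reversed iteration processes the leftmost entry last)
def pvRunB : List (Int × Int × Int) → PySem.Dict Int Int × Int × Bool
  | [] => (PySem.Dict.empty, 0, true)
  | e :: rest => pvStepB (pvRunB rest) e

lemma pvRunB_eq (l : List (Int × Int × Int)) :
    l.reverse.foldl pvStepB (PySem.Dict.empty, 0, true) = pvRunB l := by
  induction l with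
  | nil => rfl
  | cons e rest ih =>
    simp [List.reverse_cons, List.foldl_append, ih, pvRunB]

def pvSumD : List (Int × Int × Int) → Int
  | [] => 0
  | e :: rest => e.2.2 + pvSumD rest

lemma pvRunB_sum (l : List (Int × Int × Int)) : (pvRunB l).2.1 = pvSumD l := by
  induction l with
  | nil => rfl
  | cons e rest ih => simp [pvRunB, pvStepB, pvSumD, ih]; ring

lemma pvRunB_dict (e : Int × Int × Int) (rest : List (Int × Int × Int)) :
    (pvRunB (e :: rest)).1 = (pvRunB rest).1.insert (12 * e.1 + e.2.1) (pvSumD rest) := by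
  simp [pvRunB, pvStepB, pvRunB_sum]

-- the inner scan of A, characterised by B's dict of the scanned suffix
lemma pvInnerA_char (l : List (Int × Int × Int)) (sy sm : Int) : ∀ total : Int,
    pvInnerA sy sm l total =
      (match (pvRunB l).1.get? (12 * sy + sm + 11) with
       | some tgt => decide (total + pvSumD l - tgt > 180)
       | none => false) := by
  induction l with
  | nil => intro total; simp [pvInnerA, pvRunB, PySem.Dict.get?_empty]
  | cons e rest ih =>
    intro total
    rw [pvRunB_dict, PySem.Dict.get?_insert]
    by_cases h : (e.1 - sy) * 12 + (e.2.1 - sm) = 11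
    · have ht : 12 * sy + sm + 11 = 12 * e.1 + e.2.1 := by rw [sub_mul] at h; omega
      have harith : total + pvSumD (e :: rest) - pvSumD rest = total + e.2.2 := by
        simp [pvSumD]; ring
      simp only [pvInnerA, if_pos h, if_pos ht, harith]
    · have ht : ¬ (12 * sy + sm + 11 = 12 * e.1 + e.2.1) := by rw [sub_mul] at h; omega
      simp only [pvInnerA, if_neg h, if_neg ht, ih (total + e.2.2)]
      cases hg : (pvRunB rest).1.get? (12 * sy + sm + 11) with
      | none => rfl
      | some tgt =>
        have harith : total + e.2.2 + pvSumD rest - tgt = total + pvSumD (e :: rest) - tgt := by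
          simp [pvSumD]; ring
        simp only [harith]

lemma pvRunB_ok (l : List (Int × Int × Int)) : (pvRunB l).2.2 = pvOuterA l := by
  induction l with
  | nil => rfl
  | cons e rest ih =>
    have hself : ¬ ((e.1 - e.1) * 12 + (e.2.1 - e.2.1) = 11) := by
      simp
    have hinner : pvInnerA e.1 e.2.1 (e :: rest) 0 =
        (match (pvRunB rest).1.get? (12 * e.1 + e.2.1 + 11) with
         | some tgt => decide (0 + e.2.2 + pvSumD rest - tgt > 180)
         | none => false) := by
      simp only [pvInnerA, if_neg hself]
      exact pvInnerA_char rest e.1 e.2.1 (0 + e.2.2)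
    show (pvStepB (pvRunB rest) e).2.2 = pvOuterA (e :: rest)
    simp only [pvStepB, pvOuterA, hinner, pvRunB_sum]
    cases hg : (pvRunB rest).1.get? (12 * e.1 + e.2.1 + 11) with
    | none => simpa using ih
    | some tgt =>
      have hc : pvSumD rest + e.2.2 = e.2.2 + pvSumD rest := by ring
      simp [ih, hc]

-- the two flattenings build the same list
lemma pvFlat_gen (ys : List (Int × List (Int × Int))) : ∀ acc : List (Int × Int × Int),
    ys.foldl
      (fun acc p =>
        (PySem.List.sorted p.2 (fun q => q.1)).foldl
          (fun acc2 q => acc2 ++ [(p.1, q.1, q.2)]) acc) acc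
    = acc ++ ys.flatMap
        (fun p => (PySem.List.sorted p.2 (fun q => q.1)).map (fun q => (p.1, q.1, q.2))) := by
  induction ys with
  | nil => intro acc; simp
  | cons p rest ih =>
    intro acc
    rw [List.foldl_cons, PySem.List.foldl_append_singleton_eq_map, ih,
      List.flatMap_cons, List.append_assoc]

lemma pvFlat_eq (monthly_days : List (Int × List (Int × Int))) :
    pvFlattenA monthly_days = pvFlatB monthly_days := by
  unfold pvFlattenA pvFlatB
  rw [pvFlat_gen]
  simp

-- ===== VERDICT (by name: the statement is the Claim_ definition above) =====
theorem check_12_months_period_spec : Claim_equal_check_12_months_period := by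
  intro monthly_days _
  show check_12_months_period monthly_days = check_12_months_period_alt monthly_days
  unfold check_12_months_period check_12_months_period_alt
  rw [pvRunB_eq, pvRunB_ok, pvFlat_eq]
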